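-- pv_equiv track=rewrite | github.com/sese7414/coding-test-practice | python/40_flip_trigonometry.py | solution
-- ===== SOURCE A (Python) =====
-- def solution(n):
--     three = []
--     answer = 0
--     while n > 0:
--         three.append(n % 3)
--         n = n // 3
--     three.reverse()
--     for i in range(len(three)):
--         answer += (3**i) * three[i]
--     return answer
-- ===== SOURCE B (Python) =====
-- def solution(n):
--     answer = 0
--     while n > 0:
--         answer = answer * 3 + n % 3
--         n //= 3
--     return answer
-- ===== Notes on version B (the rewrite author's own statement) =====
-- stated objective: simpler
-- what changed: Horner-style single loop accumulating answer = answer*3 + n%3 while dividing n, instead of collecting digits into a list, reversing it and summing 3**i weighted terms.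
import Mathlib
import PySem

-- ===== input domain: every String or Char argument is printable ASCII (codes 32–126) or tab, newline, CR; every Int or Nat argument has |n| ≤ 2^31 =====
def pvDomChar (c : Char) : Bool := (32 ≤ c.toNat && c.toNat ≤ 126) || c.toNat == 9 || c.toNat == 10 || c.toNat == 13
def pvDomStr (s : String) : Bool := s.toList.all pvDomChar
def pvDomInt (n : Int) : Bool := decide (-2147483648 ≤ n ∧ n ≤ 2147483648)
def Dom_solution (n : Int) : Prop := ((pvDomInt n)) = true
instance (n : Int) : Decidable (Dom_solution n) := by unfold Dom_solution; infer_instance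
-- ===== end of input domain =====

-- B replaces A's digit list + reverse + 3**i weighted sum by a single Horner-style loop (simpler; return value only).

-- ===== PORT A =====
-- the `while n > 0` loop collecting n % 3 and flooring n by 3 (list built head-first, i.e. append order)
def pyDigits (n : Int) : List Int :=
  if h : n > 0 then PySem.Int.mod n 3 :: pyDigits (PySem.Int.floordiv n 3) else []
termination_by n.toNat
decreasing_by
  rw [PySem.Int.floordiv_eq_ediv_of_pos (by omega : (0:Int) < 3)]
  omega

def solution (n : Int) : Int :=
  let three := (pyDigits n).reverse
  -- `for i in range(len(three)): answer += (3**i) * three[i]`; three[i] is in range, ported as getD i 0 (exact here)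
  (List.range three.length).foldl (fun answer i => answer + 3 ^ i * three.getD i 0) 0

-- ===== PORT B =====
def hornerLoop (n answer : Int) : Int :=
  if h : n > 0 then hornerLoop (PySem.Int.floordiv n 3) (answer * 3 + PySem.Int.mod n 3) else answer
termination_by n.toNat
decreasing_by
  rw [PySem.Int.floordiv_eq_ediv_of_pos (by omega : (0:Int) < 3)]
  omega

def solution_alt (n : Int) : Int := hornerLoop n 0

-- ===== PRECONDITION & SPEC =====
def Spec_solution (n : Int) (out : Int) : Prop := out = solution_alt n
instance (n : Int) (out : Int) : Decidable (Spec_solution n out) := by unfold Spec_solution; infer_instance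

-- ===== CLAIM (what is proved, stated in full; the proofs are below) =====
def Claim_equal_solution : Prop := ∀ (n : Int), Dom_solution n → Spec_solution n (solution n)

-- ===== LEMMAS AND PROOFS =====

-- value of a digit list, least-significant digit first
def lsbVal : List Int → Int
  | [] => 0
  | d :: t => d + 3 * lsbVal t

theorem lsbVal_append_singleton (M : List Int) (d : Int) :
    lsbVal (M ++ [d]) = lsbVal M + 3 ^ M.length * d := by
  induction M with
  | nil => simp [lsbVal]
  | cons x t ih => simp [lsbVal, ih, pow_succ]; ring

theorem foldl_range_eq_lsbVal (L : List Int) :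
    (List.range L.length).foldl (fun answer i => answer + 3 ^ i * L.getD i 0) 0 = lsbVal L := by
  induction L using List.reverseRecOn with
  | nil => simp [lsbVal]
  | append_singleton M d ih =>
      have hc : (List.range M.length).foldl
          (fun answer i => answer + 3 ^ i * (M ++ [d]).getD i 0) 0
          = (List.range M.length).foldl (fun answer i => answer + 3 ^ i * M.getD i 0) 0 := by
        apply PySem.List.foldl_congr_mem
        intro a i hi
        have hilt : i < M.length := List.mem_range.mp hi
        simp [List.getD, List.getElem?_append_left hilt]
      simp only [List.length_append, List.length_cons, List.length_nil,
        List.range_succ, List.foldl_append, List.foldl_cons, List.foldl_nil]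
      rw [hc, ih, lsbVal_append_singleton]
      simp [List.getD]

theorem hornerLoop_eq_foldl (n answer : Int) :
    hornerLoop n answer = (pyDigits n).foldl (fun a d => a * 3 + d) answer := by
  induction n, answer using hornerLoop.induct with
  | case1 n answer h ih =>
      rw [hornerLoop, pyDigits, dif_pos h, dif_pos h, List.foldl_cons]
      exact ih
  | case2 n answer h =>
      rw [hornerLoop, pyDigits, dif_neg h, dif_neg h, List.foldl_nil]

theorem foldl_horner (L : List Int) (answer : Int) :
    L.foldl (fun a d => a * 3 + d) answer = answer * 3 ^ L.length + lsbVal L.reverse := by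
  induction L generalizing answer with
  | nil => simp [lsbVal]
  | cons d t ih =>
      simp only [List.foldl_cons, ih, List.reverse_cons, lsbVal_append_singleton,
        List.length_reverse, List.length_cons, pow_succ]
      ring

-- ===== VERDICT (by name: the statement is the Claim_ definition above) =====
theorem solution_spec : Claim_equal_solution := by
  intro n _
  unfold Spec_solution solution solution_alt
  rw [hornerLoop_eq_foldl, foldl_horner, foldl_range_eq_lsbVal]
  simp
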